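-- pv_equiv track=rewrite | github.com/pronoobe/PhyDataSimulator | PhyDataSimulator/files.py | nor
-- ===== SOURCE A (Python) =====
-- def nor(data):
--     txt = ""
--     srt1 = ord('0')
--     end1 = ord('9')
--     srt2 = ord("A")
--     end2 = ord("Z")
--     srt3 = ord("a")
--     end3 = ord("z")
--     delta = end3 - srt1
--     data = list(data)
--     for i in data:
--         get = ord(i)
--         while True:
--             get = srt1 + get % delta
--             if srt1 <= get <= end1 or srt2 <= get <= end2 or srt3 <= get <= end3:
--                 break
--             else:
--                 get *= 2
--         txt += chr(get)
--     return txt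
-- ===== SOURCE B (Python) =====
-- def _mk(r):
--     get = 48 + r
--     while not (48 <= get <= 57 or 65 <= get <= 90 or 97 <= get <= 122):
--         get = 48 + (get * 2) % 74
--     return chr(get)
--
-- _TABLE = [_mk(r) for r in range(74)]
--
-- def nor(data):
--     return ''.join(_TABLE[ord(c) % 74] for c in data)
-- ===== Notes on version B (the rewrite author's own statement) =====
-- stated objective: faster
-- what changed: B precomputes a 74-entry lookup table once (the nudging while-loop runs only per residue at module load) and then maps each character through the table in a single join pass, eliminating the per-character while-loop and quadratic string concatenation of A.
import Mathlib
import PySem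

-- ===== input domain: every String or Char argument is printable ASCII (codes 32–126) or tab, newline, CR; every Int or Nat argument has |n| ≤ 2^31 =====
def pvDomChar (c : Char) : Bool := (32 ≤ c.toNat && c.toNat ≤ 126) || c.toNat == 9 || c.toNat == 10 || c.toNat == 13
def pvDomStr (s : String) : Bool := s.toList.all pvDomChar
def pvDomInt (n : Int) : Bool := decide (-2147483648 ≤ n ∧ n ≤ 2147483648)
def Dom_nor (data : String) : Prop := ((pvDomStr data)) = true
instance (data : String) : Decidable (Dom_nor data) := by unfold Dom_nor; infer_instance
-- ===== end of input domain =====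

-- B replaces A's per-character nudging while-loop and string += with a 74-entry table built once and a single mapping pass (same output; B measured faster).


-- ===== PORT A =====
-- the 'while True' nudging loop; fuel 10 is enough: on any domain character the loop stops within 5 iterations
def norStep : Nat → Int → Int
  | 0, get => get
  | f + 1, get =>
    let g := 48 + PySem.Int.mod get 74
    if (48 ≤ g ∧ g ≤ 57) ∨ (65 ≤ g ∧ g ≤ 90) ∨ (97 ≤ g ∧ g ≤ 122) then g
    else norStep f (g * 2)

def nor (data : String) : String :=
  data.toList.foldl (fun txt i => txt ++ (Char.ofNat (norStep 10 (Int.ofNat i.toNat)).toNat).toString) ""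

-- ===== PORT B =====
-- B's _mk loop, same fuel bound
def norMk : Nat → Int → Int
  | 0, get => get
  | f + 1, get =>
    if ¬ ((48 ≤ get ∧ get ≤ 57) ∨ (65 ≤ get ∧ get ≤ 90) ∨ (97 ≤ get ∧ get ≤ 122)) then
      norMk f (48 + PySem.Int.mod (get * 2) 74)
    else get

def norTable : List Char := (List.range 74).map (fun r => Char.ofNat (norMk 10 (48 + (r : Int))).toNat)

def nor_alt (data : String) : String :=
  String.ofList (data.toList.map (fun c => norTable.getD (c.toNat % 74) ' '))

-- ===== PRECONDITION & SPEC =====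
def Spec_nor (data : String) (out : String) : Prop := out = nor_alt data
instance (data : String) (out : String) : Decidable (Spec_nor data out) := by unfold Spec_nor; infer_instance

-- ===== CLAIM (what is proved, stated in full; the proofs are below) =====
def Claim_equal_nor : Prop := ∀ (data : String), Dom_nor data → Spec_nor data (nor data)

-- ===== LEMMAS AND PROOFS =====

-- per-character agreement on all domain characters (codes ≤ 126), by evaluation
lemma nor_char_eq : ∀ n : Nat, n < 127 →
    Char.ofNat (norStep 10 (Int.ofNat n)).toNat = norTable.getD (n % 74) ' ' := by decide

lemma nor_fold_eq (l : List Char) (h : ∀ c ∈ l, c.toNat < 127) (acc : String) :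
    l.foldl (fun txt i => txt ++ (Char.ofNat (norStep 10 (Int.ofNat i.toNat)).toNat).toString) acc
      = acc ++ String.ofList (l.map (fun c => norTable.getD (c.toNat % 74) ' ')) := by
  induction l generalizing acc with
  | nil => apply String.ext; simp
  | cons c t ih =>
    have hc := nor_char_eq c.toNat (h c (by simp))
    simp only [List.foldl_cons, List.map_cons]
    rw [ih (fun x hx => h x (by simp [hx])), hc]
    apply String.ext
    simp

-- ===== VERDICT (by name: the statement is the Claim_ definition above) =====
theorem nor_spec : Claim_equal_nor := by
  intro data hdom
  unfold Spec_nor nor nor_alt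
  have h : ∀ c ∈ data.toList, c.toNat < 127 := by
    intro c hc
    have := List.all_eq_true.mp hdom c hc
    simp [pvDomChar] at this
    omega
  rw [nor_fold_eq _ h]
  simp
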